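-- pv_equiv track=rewrite | github.com/wouterpolet/Advent-of-Code | python/src/aoc2019/14/solution2.py | used_by_other
-- ===== SOURCE A (Python) =====
-- def used_by_other(material, needed, reactions):
--     if material == "ORE":
--         return False
--     for need in needed.keys():
--         if need == "ORE" or need == material:
--             continue
--         if uses_material(material, need, reactions):
--             return True
--     return False
--
-- def uses_material(material, ingredient, reactions):
--     checking = [(0, ingredient)]
--     while len(checking) != 0:
--         current = checking.pop()
--         if current[1] == material:
--             return True
--         checking.extend(reactions.get(current[1], (0, []))[1])
--     return False
-- ===== SOURCE B (Python) =====
-- def used_by_other(material, needed, reactions):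
--     if material == "ORE":
--         return False
--     # one multi-source DFS with a visited set instead of A's per-key visited-set-free re-scan
--     stack = [k for k in needed if k != "ORE" and k != material]
--     visited = set(stack)
--     while stack:
--         v = stack.pop()
--         for _, ing in reactions.get(v, (0, []))[1]:
--             if ing == material:
--                 return True
--             if ing not in visited:
--                 visited.add(ing)
--                 stack.append(ing)
--     return False
-- ===== Notes on version B (the rewrite author's own statement) =====
-- stated objective: alternative
-- what changed: A re-runs, for every needed key, a visited-set-free DFS that can re-expand the same node many times (and loops forever on cycles); B does one multi-source DFS over all needed keys at once with a visited set, so each reaction is expanded at most once.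
-- outside the precondition, e.g. on used_by_other('X', {'A': 1}, {'A': (1, [(1, 'X')]), 'B': (1, [(1, 'B')])}): A returns True, B returns True; on used_by_other('X', {'C': 1}, {'B': (1, [(1, 'B')])}): A returns False, B returns False
import Mathlib
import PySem

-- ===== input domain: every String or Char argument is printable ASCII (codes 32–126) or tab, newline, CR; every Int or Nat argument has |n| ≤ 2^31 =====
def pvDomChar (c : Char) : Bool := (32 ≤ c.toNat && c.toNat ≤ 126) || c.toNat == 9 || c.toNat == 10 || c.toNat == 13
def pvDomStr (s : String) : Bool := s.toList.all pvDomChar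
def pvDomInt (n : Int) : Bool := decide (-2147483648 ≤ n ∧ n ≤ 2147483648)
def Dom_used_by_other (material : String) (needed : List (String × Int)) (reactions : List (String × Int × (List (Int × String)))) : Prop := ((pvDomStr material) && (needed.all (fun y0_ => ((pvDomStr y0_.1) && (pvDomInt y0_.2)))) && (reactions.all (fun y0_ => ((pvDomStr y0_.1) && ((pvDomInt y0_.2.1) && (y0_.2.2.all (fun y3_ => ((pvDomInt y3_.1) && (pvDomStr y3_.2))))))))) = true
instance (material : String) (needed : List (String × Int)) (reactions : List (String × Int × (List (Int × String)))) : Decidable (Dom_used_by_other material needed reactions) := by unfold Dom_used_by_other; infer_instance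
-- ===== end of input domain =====

-- B replaces A's per-key visited-set-free DFS (which re-expands nodes and can diverge on
-- cycles) by one multi-source DFS with a visited set (objective: alternative).

-- shared lookup helper: reactions.get(v, (0, []))  (dict lookup = first match)
def pvGetR (reactions : List (String × Int × (List (Int × String)))) (v : String) : Int × List (Int × String) :=
  ((reactions.find? (fun p => p.1 == v)).map (·.2)).getD (0, [])

-- names of the ingredients of v: the successor names in the reaction graph
def pvSucc (reactions : List (String × Int × (List (Int × String)))) (v : String) : List String :=
  (pvGetR reactions v).2.map (·.2)

-- ===== PORT A =====
-- Python's `checking` list has its top (pop position) LAST; here the stack is kept top-FIRST,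
-- so pop = head and `checking.extend(l)` = `l.reverse ++ rest`.  The fuel argument only makes
-- the loop total in Lean; Pre_ (acyclic reaction graph) guarantees it is never exhausted.
def pvALoop (material : String) (reactions : List (String × Int × (List (Int × String)))) : Nat → List (Int × String) → Bool
  | 0, _ => false
  | _ + 1, [] => false
  | f + 1, c :: rest =>
    if c.2 == material then true
    else pvALoop material reactions f ((pvGetR reactions c.2).2.reverse ++ rest)

def pvFuelA (reactions : List (String × Int × (List (Int × String)))) : Nat :=
  ((reactions.map (fun p => p.2.2.length)).sum + 1) ^ (reactions.length + 1)

def pvUsesMaterial (material : String) (ingredient : String) (reactions : List (String × Int × (List (Int × String)))) : Bool :=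
  pvALoop material reactions (pvFuelA reactions) [(0, ingredient)]

def pvAOuter (material : String) (reactions : List (String × Int × (List (Int × String)))) : List String → Bool
  | [] => false
  | k :: rest =>
    if k == "ORE" || k == material then pvAOuter material reactions rest
    else if pvUsesMaterial material k reactions then true
    else pvAOuter material reactions rest

def used_by_other (material : String) (needed : List (String × Int)) (reactions : List (String × Int × (List (Int × String)))) : Bool :=
  if material == "ORE" then false
  else pvAOuter material reactions (PySem.List.dedup (needed.map (·.1)))

-- ===== PORT B =====
-- the inner for-loop over reactions.get(v, (0, []))[1]: none = `return True` was hit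
def pvBInner (material : String) : List (Int × String) → List String → PySem.Set String → Option (List String × PySem.Set String)
  | [], stack, visited => some (stack, visited)
  | p :: rest, stack, visited =>
    if p.2 == material then none
    else if PySem.Set.contains visited p.2 then pvBInner material rest stack visited
    else pvBInner material rest (p.2 :: stack) (PySem.Set.add visited p.2)

-- the while-loop; stack kept top-FIRST (Python pops from the end, appends to the end).
-- The fuel only makes the loop total in Lean: each iteration pops one name and pushes only
-- never-visited names, so `starts + total ingredient count + 1` is provably never exhausted.
def pvBLoop (material : String) (reactions : List (String × Int × (List (Int × String)))) : Nat → List String → PySem.Set String → Bool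
  | 0, _, _ => false
  | _ + 1, [], _ => false
  | f + 1, v :: stack, visited =>
    match pvBInner material (pvGetR reactions v).2 stack visited with
    | none => true
    | some (st, vi) => pvBLoop material reactions f st vi

def used_by_other_alt (material : String) (needed : List (String × Int)) (reactions : List (String × Int × (List (Int × String)))) : Bool :=
  if material == "ORE" then false
  else
    let starts := (PySem.List.dedup (needed.map (·.1))).filter (fun k => !(k == "ORE") && !(k == material))
    pvBLoop material reactions (starts.length + (reactions.map (fun p => p.2.2.length)).sum + 1)
      starts.reverse (PySem.Set.ofList starts)

-- ===== PRECONDITION & SPEC =====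
-- bounded longest-path: pvLP n v = length of the longest ingredient chain from v, explored to depth n
def pvMaxL (l : List Nat) : Nat := l.foldr max 0

def pvLP (reactions : List (String × Int × (List (Int × String)))) : Nat → String → Nat
  | 0, _ => 0
  | n + 1, v =>
    if (pvSucc reactions v).isEmpty then 0
    else 1 + pvMaxL ((pvSucc reactions v).map (pvLP reactions n))

-- Pre_ excludes inputs whose reaction graph contains a cycle: there A's visited-set-free DFS can
-- loop forever (Python non-termination); on some cyclic inputs (cycle unreachable from the needed
-- keys, or the material found first) A still returns, and B returns the same value there.
-- The condition is a property of the input graph only (neither port computes chain lengths):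
-- pvLP n v is the length of the longest ingredient chain from v explored to depth n, and a finite
-- graph with K reactions is acyclic exactly when no chain from a key is longer than K.
def Pre_used_by_other (material : String) (needed : List (String × Int)) (reactions : List (String × Int × (List (Int × String)))) : Prop :=
  ∀ k ∈ reactions.map (·.1), pvLP reactions (reactions.length + 1) k ≤ reactions.length

instance (material : String) (needed : List (String × Int)) (reactions : List (String × Int × (List (Int × String)))) : Decidable (Pre_used_by_other material needed reactions) := by unfold Pre_used_by_other; infer_instance

def pvWitness_used_by_other : String × (List (String × Int)) × (List (String × Int × (List (Int × String)))) :=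
  ("FUEL", [("A", 1)], [("A", (1, [(1, "FUEL")]))])

def Spec_used_by_other (material : String) (needed : List (String × Int)) (reactions : List (String × Int × (List (Int × String)))) (out : Bool) : Prop := out = used_by_other_alt material needed reactions
instance (material : String) (needed : List (String × Int)) (reactions : List (String × Int × (List (Int × String)))) (out : Bool) : Decidable (Spec_used_by_other material needed reactions out) := by unfold Spec_used_by_other; infer_instance

-- ===== CLAIM (what is proved, stated in full; the proofs are below) =====
def Claim_equal_used_by_other : Prop := ∀ (material : String) (needed : List (String × Int)) (reactions : List (String × Int × (List (Int × String)))), Dom_used_by_other material needed reactions → Pre_used_by_other material needed reactions → Spec_used_by_other material needed reactions (used_by_other material needed reactions)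

-- ===== LEMMAS AND PROOFS =====

-- the reaction graph, abstractly
def pvStep (reactions : List (String × Int × (List (Int × String)))) (u v : String) : Prop := v ∈ pvSucc reactions u
def pvReach (reactions : List (String × Int × (List (Int × String)))) (u v : String) : Prop := Relation.ReflTransGen (pvStep reactions) u v
def pvRank (reactions : List (String × Int × (List (Int × String)))) (v : String) : Nat := pvLP reactions (reactions.length + 1) v
def pvW (reactions : List (String × Int × (List (Int × String)))) (v : String) : Nat :=
  ((reactions.map (fun p => p.2.2.length)).sum + 1) ^ (pvRank reactions v + 1)
def pvSW (reactions : List (String × Int × (List (Int × String)))) (stack : List (Int × String)) : Nat :=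
  (stack.map (fun c => pvW reactions c.2)).sum

theorem le_pvMaxL {l : List Nat} {x : Nat} (h : x ∈ l) : x ≤ pvMaxL l := by
  induction l with
  | nil => cases h
  | cons a t ih =>
    simp only [List.mem_cons] at h
    simp only [pvMaxL, List.foldr]
    rcases h with h | h
    · omega
    · have := ih h; simp only [pvMaxL] at this; omega



theorem pvLP_succ (reactions : List (String × Int × (List (Int × String)))) (n : Nat) (v : String) :
    pvLP reactions (n + 1) v =
      if (pvSucc reactions v).isEmpty then 0
      else 1 + pvMaxL ((pvSucc reactions v).map (pvLP reactions n)) := rfl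


theorem pvLP_stab (reactions : List (String × Int × (List (Int × String)))) :
    ∀ n v, pvLP reactions (n + 1) v ≤ n → ∀ m, pvLP reactions (n + 1 + m) v = pvLP reactions (n + 1) v := by
  intro n
  induction n with
  | zero =>
    intro v h m
    rw [pvLP_succ] at h ⊢
    by_cases he : (pvSucc reactions v).isEmpty
    · rw [if_pos he]
      cases m with
      | zero => rw [pvLP_succ, if_pos he]
      | succ m => rw [show 0 + 1 + (m + 1) = (m + 1) + 1 by omega, pvLP_succ, if_pos he]
    · rw [if_neg he] at h; omega
  | succ n ih =>
    intro v h m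
    by_cases he : (pvSucc reactions v).isEmpty
    · rw [pvLP_succ, if_pos he]
      rw [show n + 1 + 1 + m = (n + 1 + m) + 1 by omega, pvLP_succ, if_pos he]
    · rw [pvLP_succ, if_neg he] at h
      have hb : ∀ u ∈ pvSucc reactions v, pvLP reactions (n + 1) u ≤ n := by
        intro u hu
        have hle : pvLP reactions (n + 1) u ≤
            pvMaxL ((pvSucc reactions v).map (pvLP reactions (n + 1))) :=
          le_pvMaxL (List.mem_map.mpr ⟨u, hu, rfl⟩)
        omega
      have hcong : ((pvSucc reactions v).map (pvLP reactions (n + 1 + m))) =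
          ((pvSucc reactions v).map (pvLP reactions (n + 1))) := by
        apply List.map_congr_left
        intro u hu
        exact ih u (hb u hu) m
      rw [show n + 1 + 1 + m = (n + 1 + m) + 1 by omega, pvLP_succ, if_neg he, hcong,
        pvLP_succ, if_neg he]

theorem mem_keys_of_succ_ne (reactions : List (String × Int × (List (Int × String)))) (v : String)
    (h : pvSucc reactions v ≠ []) : v ∈ reactions.map (·.1) := by
  unfold pvSucc pvGetR at h
  cases hf : reactions.find? (fun p => p.1 == v) with
  | none => rw [hf] at h; simp at h
  | some p =>
    have hmem := List.mem_of_find?_eq_some hf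
    have heq : p.1 = v := by
      have := List.find?_some hf
      simpa using this
    exact heq ▸ List.mem_map.mpr ⟨p, hmem, rfl⟩


theorem pvRank_le (material : String) (needed : List (String × Int)) (reactions : List (String × Int × (List (Int × String))))
    (hpre : Pre_used_by_other material needed reactions) (v : String) :
    pvRank reactions v ≤ reactions.length := by
  unfold pvRank
  by_cases he : (pvSucc reactions v).isEmpty
  · rw [pvLP_succ, if_pos he]; omega
  · have hv : v ∈ reactions.map (·.1) := by
      apply mem_keys_of_succ_ne
      intro hnil
      rw [hnil] at he; simp at he
    exact hpre v hv

theorem pvRank_lt (material : String) (needed : List (String × Int)) (reactions : List (String × Int × (List (Int × String))))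
    (hpre : Pre_used_by_other material needed reactions) {u v : String} (h : u ∈ pvSucc reactions v) :
    pvRank reactions u < pvRank reactions v := by
  have hne : pvSucc reactions v ≠ [] := by
    intro hnil; rw [hnil] at h; cases h
  have hv : v ∈ reactions.map (·.1) := mem_keys_of_succ_ne reactions v hne
  have hK1 : 1 ≤ reactions.length := by
    rcases List.mem_map.mp hv with ⟨p, hp, _⟩
    cases reactions with
    | nil => cases hp
    | cons _ _ => simp
  have hvK : pvLP reactions (reactions.length + 1) v ≤ reactions.length := hpre v hv
  have hEmpty : ¬ (pvSucc reactions v).isEmpty := by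
    cases hsv : pvSucc reactions v with
    | nil => exact absurd hsv hne
    | cons _ _ => simp
  have hlp : pvLP reactions (reactions.length + 1) v =
      1 + pvMaxL ((pvSucc reactions v).map (pvLP reactions reactions.length)) := by
    rw [pvLP_succ, if_neg hEmpty]
  have hmax : pvMaxL ((pvSucc reactions v).map (pvLP reactions reactions.length)) ≤
      reactions.length - 1 := by omega
  have hu : pvLP reactions reactions.length u ≤ reactions.length - 1 :=
    le_trans (le_pvMaxL (List.mem_map.mpr ⟨u, h, rfl⟩)) hmax
  have hstab : pvLP reactions (reactions.length + 1) u = pvLP reactions reactions.length u := by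
    obtain ⟨K', hK'⟩ : ∃ K', reactions.length = K' + 1 := ⟨reactions.length - 1, by omega⟩
    rw [hK'] at hu ⊢
    have hs := pvLP_stab reactions K' u (by omega) 1
    simpa using hs
  unfold pvRank
  rw [hstab, hlp]
  have hx := le_pvMaxL (l := (pvSucc reactions v).map (pvLP reactions reactions.length))
    (List.mem_map.mpr ⟨u, h, rfl⟩)
  omega

theorem one_le_pvW (reactions : List (String × Int × (List (Int × String)))) (v : String) : 1 ≤ pvW reactions v := by
  unfold pvW
  exact Nat.one_le_pow _ _ (by omega)


theorem pvSW_push (material : String) (needed : List (String × Int)) (reactions : List (String × Int × (List (Int × String))))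
    (hpre : Pre_used_by_other material needed reactions) (v : String) :
    1 + pvSW reactions (pvGetR reactions v).2 ≤ pvW reactions v := by
  by_cases he : (pvGetR reactions v).2 = []
  · rw [he]
    have h1 := one_le_pvW reactions v
    simp [pvSW]; omega
  · have hne : pvSucc reactions v ≠ [] := by
      unfold pvSucc; intro hnil
      exact he (List.map_eq_nil_iff.mp hnil)
    have hfind : ∃ p ∈ reactions, (pvGetR reactions v).2 = p.2.2 := by
      unfold pvSucc pvGetR at *
      cases hf : reactions.find? (fun p => p.1 == v) with
      | none => rw [hf] at he; simp at he
      | some p => exact ⟨p, List.mem_of_find?_eq_some hf, by simp⟩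
    rcases hfind with ⟨p, hp, hpe⟩
    have hlen : (pvGetR reactions v).2.length ≤ (reactions.map (fun p => p.2.2.length)).sum := by
      rw [hpe]
      exact List.single_le_sum (fun _ _ => Nat.zero_le _) _
        (List.mem_map.mpr ⟨p, hp, rfl⟩)
    have hbound : ∀ c ∈ (pvGetR reactions v).2, pvW reactions c.2 ≤
        ((reactions.map (fun p => p.2.2.length)).sum + 1) ^ (pvRank reactions v) := by
      intro c hc
      have hmem : c.2 ∈ pvSucc reactions v := List.mem_map.mpr ⟨c, hc, rfl⟩
      have hlt := pvRank_lt material needed reactions hpre hmem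
      unfold pvW
      exact Nat.pow_le_pow_right (by omega) (by omega)
    have hsum : pvSW reactions (pvGetR reactions v).2 ≤
        (pvGetR reactions v).2.length *
          (((reactions.map (fun p => p.2.2.length)).sum + 1) ^ (pvRank reactions v)) := by
      unfold pvSW
      have hs := List.sum_le_card_nsmul ((pvGetR reactions v).2.map (fun c => pvW reactions c.2))
        (((reactions.map (fun p => p.2.2.length)).sum + 1) ^ (pvRank reactions v))
        (by intro x hx
            rcases List.mem_map.mp hx with ⟨c, hc, rfl⟩
            exact hbound c hc)
      simpa [smul_eq_mul, List.length_map] using hs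
    have hb1 : 1 ≤ ((reactions.map (fun p => p.2.2.length)).sum + 1) ^ (pvRank reactions v) :=
      Nat.one_le_pow _ _ (by omega)
    unfold pvW
    rw [pow_succ]
    set E := (reactions.map (fun p => p.2.2.length)).sum with hE
    set B := (E + 1) ^ (pvRank reactions v) with hB
    have hlen2 : (pvGetR reactions v).2.length ≤ E := hlen
    calc 1 + pvSW reactions (pvGetR reactions v).2
        ≤ 1 + (pvGetR reactions v).2.length * B := by omega
      _ ≤ B + E * B := by
          have := Nat.mul_le_mul_right B hlen2
          omega
      _ = B * (E + 1) := by ring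


theorem pvALoop_iff (material : String) (needed : List (String × Int)) (reactions : List (String × Int × (List (Int × String))))
    (hpre : Pre_used_by_other material needed reactions) :
    ∀ (f : Nat) (stack : List (Int × String)), pvSW reactions stack ≤ f →
      (pvALoop material reactions f stack = true ↔ ∃ c ∈ stack, pvReach reactions c.2 material) := by
  intro f
  induction f with
  | zero =>
    intro stack hsw
    cases stack with
    | nil => simp [pvALoop]
    | cons c rest =>
      exfalso
      have h1 := one_le_pvW reactions c.2
      unfold pvSW at hsw
      simp only [List.map_cons, List.sum_cons] at hsw
      omega
  | succ f ih =>
    intro stack hsw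
    cases stack with
    | nil => simp [pvALoop]
    | cons c rest =>
      have hsw' : pvW reactions c.2 + pvSW reactions rest ≤ f + 1 := by
        unfold pvSW at hsw ⊢
        simp only [List.map_cons, List.sum_cons] at hsw
        omega
      show (if c.2 == material then true
        else pvALoop material reactions f ((pvGetR reactions c.2).2.reverse ++ rest)) = true ↔ _
      by_cases hm : c.2 = material
      · rw [if_pos (by simp [hm])]
        subst hm
        exact ⟨fun _ => ⟨c, List.mem_cons_self, Relation.ReflTransGen.refl⟩, fun _ => rfl⟩
      · rw [if_neg (by simp [hm])]
        have hpush := pvSW_push material needed reactions hpre c.2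
        have hnew : pvSW reactions ((pvGetR reactions c.2).2.reverse ++ rest) ≤ f := by
          unfold pvSW at *
          rw [List.map_append, List.sum_append, List.map_reverse, List.sum_reverse]
          omega
        rw [ih _ hnew]
        have hreach : pvReach reactions c.2 material ↔
            ∃ u ∈ pvSucc reactions c.2, pvReach reactions u material := by
          constructor
          · intro hr
            rcases Relation.ReflTransGen.cases_head hr with heq | ⟨u, hstep, hrest⟩
            · exact absurd heq hm
            · exact ⟨u, hstep, hrest⟩
          · rintro ⟨u, hu, hr⟩
            exact Relation.ReflTransGen.head hu hr
        constructor
        · rintro ⟨c', hc', hr⟩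
          rcases List.mem_append.mp hc' with hc' | hc'
          · have hc'' : c' ∈ (pvGetR reactions c.2).2 := List.mem_reverse.mp hc'
            exact ⟨c, List.mem_cons_self,
              hreach.mpr ⟨c'.2, List.mem_map.mpr ⟨c', hc'', rfl⟩, hr⟩⟩
          · exact ⟨c', List.mem_cons_of_mem _ hc', hr⟩
        · rintro ⟨c', hc', hr⟩
          rcases List.mem_cons.mp hc' with rfl | hc'
          · rcases hreach.mp hr with ⟨u, hu, hru⟩
            rcases List.mem_map.mp hu with ⟨d, hd, rfl⟩
            exact ⟨d, List.mem_append.mpr (Or.inl (List.mem_reverse.mpr hd)), hru⟩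
          · exact ⟨c', List.mem_append.mpr (Or.inr hc'), hr⟩


theorem pvUsesMaterial_iff (material : String) (needed : List (String × Int)) (reactions : List (String × Int × (List (Int × String))))
    (hpre : Pre_used_by_other material needed reactions) (k : String) :
    (pvUsesMaterial material k reactions = true ↔ pvReach reactions k material) := by
  unfold pvUsesMaterial pvFuelA
  rw [pvALoop_iff material needed reactions hpre _ [(0, k)]
    (by
      unfold pvSW pvW
      simp only [List.map_cons, List.map_nil, List.sum_cons, List.sum_nil, Nat.add_zero]
      exact Nat.pow_le_pow_right (by omega)
        (by have := pvRank_le material needed reactions hpre k; omega))]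
  constructor
  · rintro ⟨c, hc, hr⟩
    rcases List.mem_singleton.mp hc with rfl
    exact hr
  · intro hr
    exact ⟨(0, k), List.mem_singleton.mpr rfl, hr⟩


theorem pvAOuter_iff (material : String) (needed : List (String × Int)) (reactions : List (String × Int × (List (Int × String))))
    (hpre : Pre_used_by_other material needed reactions) :
    ∀ l : List String, (pvAOuter material reactions l = true ↔
      ∃ k ∈ l, (k ≠ "ORE" ∧ k ≠ material) ∧ pvReach reactions k material) := by
  intro l
  induction l with
  | nil => simp [pvAOuter]
  | cons k rest ih =>
    show (if k == "ORE" || k == material then pvAOuter material reactions rest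
      else if pvUsesMaterial material k reactions then true
      else pvAOuter material reactions rest) = true ↔ _
    by_cases hc : k = "ORE" ∨ k = material
    · rw [if_pos (by rcases hc with h | h <;> simp [h])]
      rw [ih]
      constructor
      · rintro ⟨k', hk', hcond, hr⟩
        exact ⟨k', List.mem_cons_of_mem _ hk', hcond, hr⟩
      · rintro ⟨k', hk', hcond, hr⟩
        rcases List.mem_cons.mp hk' with rfl | hk'
        · rcases hc with h | h
          · exact absurd h hcond.1
          · exact absurd h hcond.2
        · exact ⟨k', hk', hcond, hr⟩
    · rw [not_or] at hc
      rw [if_neg (by simp [hc.1, hc.2])]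
      by_cases hu : pvUsesMaterial material k reactions
      · rw [if_pos hu]
        refine ⟨fun _ => ⟨k, List.mem_cons_self, hc,
          (pvUsesMaterial_iff material needed reactions hpre k).mp hu⟩, fun _ => rfl⟩
      · rw [if_neg hu, ih]
        constructor
        · rintro ⟨k', hk', hcond, hr⟩
          exact ⟨k', List.mem_cons_of_mem _ hk', hcond, hr⟩
        · rintro ⟨k', hk', hcond, hr⟩
          rcases List.mem_cons.mp hk' with rfl | hk'
          · exact absurd ((pvUsesMaterial_iff material needed reactions hpre k').mpr hr) hu
          · exact ⟨k', hk', hcond, hr⟩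


-- ----- B side -----
def pvUraw (reactions : List (String × Int × (List (Int × String)))) : List String :=
  reactions.flatMap (fun p => p.2.2.map (·.2))

def pvMu (reactions : List (String × Int × (List (Int × String)))) (stack : List String) (vis : PySem.Set String) : Nat :=
  stack.length + ((pvUraw reactions).filter (fun x => !(PySem.Set.contains vis x))).length

theorem filter_len_le {α : Type} {p q : α → Bool} (l : List α)
    (himp : ∀ y, q y = true → p y = true) : (l.filter q).length ≤ (l.filter p).length := by
  induction l with
  | nil => simp
  | cons a t ih =>
    by_cases hq : q a = true
    · rw [List.filter_cons_of_pos hq, List.filter_cons_of_pos (himp a hq)]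
      simpa using ih
    · rw [List.filter_cons_of_neg (by simpa using hq)]
      by_cases hp : p a = true
      · rw [List.filter_cons_of_pos hp]
        simp only [List.length_cons]
        omega
      · rw [List.filter_cons_of_neg (by simpa using hp)]
        exact ih

theorem filter_len_lt {α : Type} {p q : α → Bool} {l : List α} {x : α}
    (hx : x ∈ l) (hpx : p x = true) (hqx : q x = false)
    (himp : ∀ y, q y = true → p y = true) : (l.filter q).length < (l.filter p).length := by
  induction l with
  | nil => cases hx
  | cons a t ih =>
    rcases List.mem_cons.mp hx with rfl | hx2
    · rw [List.filter_cons_of_pos hpx, List.filter_cons_of_neg (by simp [hqx])]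
      have hle := filter_len_le t himp
      simp only [List.length_cons]
      omega
    · by_cases hq : q a = true
      · rw [List.filter_cons_of_pos hq, List.filter_cons_of_pos (himp a hq)]
        simpa using ih hx2
      · rw [List.filter_cons_of_neg (by simpa using hq)]
        by_cases hp : p a = true
        · rw [List.filter_cons_of_pos hp]
          have := ih hx2
          simp only [List.length_cons]
          omega
        · rw [List.filter_cons_of_neg (by simpa using hp)]
          exact ih hx2

theorem mem_pvUraw (reactions : List (String × Int × (List (Int × String)))) (v : String) :
    ∀ p ∈ (pvGetR reactions v).2, p.2 ∈ pvUraw reactions := by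
  intro p hp
  unfold pvGetR at hp
  unfold pvUraw
  cases hf : reactions.find? (fun q => q.1 == v) with
  | none => rw [hf] at hp; simp at hp
  | some e =>
    rw [hf] at hp
    simp at hp
    exact List.mem_flatMap.mpr ⟨e, List.mem_of_find?_eq_some hf, List.mem_map.mpr ⟨p, hp, rfl⟩⟩

theorem pvBInner_none_iff (material : String) :
    ∀ (l : List (Int × String)) (stack : List String) (vis : PySem.Set String),
      pvBInner material l stack vis = none ↔ ∃ p ∈ l, p.2 = material := by
  intro l
  induction l with
  | nil => intro stack vis; simp [pvBInner]
  | cons p rest ih =>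
    intro stack vis
    show (if p.2 == material then none
      else if PySem.Set.contains vis p.2 then pvBInner material rest stack vis
      else pvBInner material rest (p.2 :: stack) (PySem.Set.add vis p.2)) = none ↔ _
    by_cases hm : p.2 = material
    · rw [if_pos (by simp [hm])]
      exact ⟨fun _ => ⟨p, List.mem_cons_self, hm⟩, fun _ => rfl⟩
    · rw [if_neg (by simp [hm])]
      have hiff : (∃ q ∈ p :: rest, q.2 = material) ↔ ∃ q ∈ rest, q.2 = material := by
        constructor
        · rintro ⟨q, hq, hqm⟩
          rcases List.mem_cons.mp hq with rfl | hq2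
          · exact absurd hqm hm
          · exact ⟨q, hq2, hqm⟩
        · rintro ⟨q, hq, hqm⟩
          exact ⟨q, List.mem_cons_of_mem _ hq, hqm⟩
      rw [hiff]
      by_cases hv : PySem.Set.contains vis p.2
      · rw [if_pos hv]; exact ih stack vis
      · rw [if_neg hv]; exact ih _ _

theorem pvBInner_some (material : String) (reactions : List (String × Int × (List (Int × String)))) :
    ∀ (l : List (Int × String)) (stack : List String) (vis : PySem.Set String)
      (st : List String) (vi : PySem.Set String),
      pvBInner material l stack vis = some (st, vi) →
      (∀ p ∈ l, p.2 ∈ pvUraw reactions) →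
      ∃ pushed : List String,
        st = pushed ++ stack ∧
        (∀ x ∈ pushed, ∃ p ∈ l, x = p.2) ∧
        (∀ x ∈ vis, x ∈ vi) ∧
        (∀ x ∈ vi, x ∈ vis ∨ x ∈ pushed) ∧
        (∀ x ∈ pushed, x ∈ vi) ∧
        (∀ p ∈ l, p.2 ≠ material ∧ p.2 ∈ vi) ∧
        pvMu reactions st vi ≤ pvMu reactions stack vis := by
  intro l
  induction l with
  | nil =>
    intro stack vis st vi h _
    simp only [pvBInner, Option.some.injEq, Prod.mk.injEq] at h
    exact ⟨[], by simp [h.1.symm], by simp, by simp [h.2], by simp [h.2], by simp,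
      by simp, by simp [h.1, h.2]⟩
  | cons p rest ih =>
    intro stack vis st vi h hU
    rw [show pvBInner material (p :: rest) stack vis =
      (if p.2 == material then none
       else if PySem.Set.contains vis p.2 then pvBInner material rest stack vis
       else pvBInner material rest (p.2 :: stack) (PySem.Set.add vis p.2)) from rfl] at h
    by_cases hm : p.2 = material
    · rw [if_pos (by simp [hm])] at h
      cases h
    · rw [if_neg (by simp [hm])] at h
      have hUrest : ∀ q ∈ rest, q.2 ∈ pvUraw reactions :=
        fun q hq => hU q (List.mem_cons_of_mem _ hq)
      by_cases hv : PySem.Set.contains vis p.2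
      · rw [if_pos hv] at h
        rcases ih stack vis st vi h hUrest with ⟨pushed, h1, h2, h3, h4, h5, h6, h7⟩
        refine ⟨pushed, h1, ?_, h3, h4, h5, ?_, h7⟩
        · intro x hx
          rcases h2 x hx with ⟨q, hq, hxq⟩
          exact ⟨q, List.mem_cons_of_mem _ hq, hxq⟩
        · intro q hq
          rcases List.mem_cons.mp hq with rfl | hq2
          · exact ⟨hm, h3 _ ((PySem.Set.contains_iff _ _).mp hv)⟩
          · exact h6 q hq2
      · rw [if_neg hv] at h
        rcases ih (p.2 :: stack) (PySem.Set.add vis p.2) st vi h hUrest with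
          ⟨pushed, h1, h2, h3, h4, h5, h6, h7⟩
        have hmemadd : p.2 ∈ PySem.Set.add vis p.2 := (PySem.Set.mem_add _ _ _).mpr (Or.inr rfl)
        refine ⟨pushed ++ [p.2], by simp [h1], ?_, ?_, ?_, ?_, ?_, ?_⟩
        · intro x hx
          rcases List.mem_append.mp hx with hx | hx
          · rcases h2 x hx with ⟨q, hq, hxq⟩
            exact ⟨q, List.mem_cons_of_mem _ hq, hxq⟩
          · exact ⟨p, List.mem_cons_self, by simpa using hx⟩
        · exact fun x hx => h3 x ((PySem.Set.mem_add _ _ _).mpr (Or.inl hx))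
        · intro x hx
          rcases h4 x hx with hx2 | hx2
          · rcases (PySem.Set.mem_add _ _ _).mp hx2 with hx3 | hx3
            · exact Or.inl hx3
            · exact Or.inr (List.mem_append.mpr (Or.inr (by simp [hx3])))
          · exact Or.inr (List.mem_append.mpr (Or.inl hx2))
        · intro x hx
          rcases List.mem_append.mp hx with hx | hx
          · exact h5 x hx
          · have hxp : x = p.2 := by simpa using hx
            exact hxp ▸ h3 _ hmemadd
        · intro q hq
          rcases List.mem_cons.mp hq with rfl | hq2
          · exact ⟨hm, h3 _ hmemadd⟩
          · exact h6 q hq2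
        · have hdrop : ((pvUraw reactions).filter
              (fun x => !(PySem.Set.contains (PySem.Set.add vis p.2) x))).length <
              ((pvUraw reactions).filter (fun x => !(PySem.Set.contains vis x))).length := by
            apply filter_len_lt (x := p.2) (hU p List.mem_cons_self)
            · simpa using hv
            · simp
            · intro y hy
              simp only [Bool.not_eq_true'] at hy ⊢
              have hyv : y ∉ PySem.Set.add vis p.2 := fun hmem => by
                rw [(PySem.Set.contains_iff _ _).mpr hmem] at hy; cases hy
              cases hcv : PySem.Set.contains vis y
              · rfl
              · exact absurd ((PySem.Set.mem_add _ _ _).mpr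
                  (Or.inl ((PySem.Set.contains_iff _ _).mp hcv))) hyv
          unfold pvMu at h7 ⊢
          simp only [List.length_cons] at h7
          omega

theorem pvBLoop_sound (material : String) (reactions : List (String × Int × (List (Int × String)))) (starts : List String) :
    ∀ (f : Nat) (stack : List String) (vis : PySem.Set String),
      (∀ x ∈ stack, ∃ k ∈ starts, pvReach reactions k x) →
      pvBLoop material reactions f stack vis = true →
      ∃ k ∈ starts, pvReach reactions k material := by
  intro f
  induction f with
  | zero => intro stack vis _ h; simp [pvBLoop] at h
  | succ f ih =>
    intro stack vis hG h
    cases stack with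
    | nil => simp [pvBLoop] at h
    | cons v rest =>
      rw [pvBLoop] at h
      cases hinner : pvBInner material (pvGetR reactions v).2 rest vis with
      | none =>
        rcases (pvBInner_none_iff material _ rest vis).mp hinner with ⟨p, hp, hpm⟩
        rcases hG v List.mem_cons_self with ⟨k, hk, hr⟩
        exact ⟨k, hk, Relation.ReflTransGen.tail hr
          (by rw [← hpm]; exact List.mem_map.mpr ⟨p, hp, rfl⟩)⟩
      | some sv =>
        obtain ⟨st, vi⟩ := sv
        rw [hinner] at h
        rcases pvBInner_some material reactions _ rest vis st vi hinner (mem_pvUraw reactions v) with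
          ⟨pushed, h1, h2, _, _, _, _, _⟩
        apply ih st vi _ h
        intro x hx
        rw [h1] at hx
        rcases List.mem_append.mp hx with hx | hx
        · rcases h2 x hx with ⟨p, hp, rfl⟩
          rcases hG v List.mem_cons_self with ⟨k, hk, hr⟩
          exact ⟨k, hk, Relation.ReflTransGen.tail hr (List.mem_map.mpr ⟨p, hp, rfl⟩)⟩
        · exact hG x (List.mem_cons_of_mem _ hx)

theorem pvClosed (material : String) (reactions : List (String × Int × (List (Int × String)))) (V : PySem.Set String)
    (hcl : ∀ w ∈ V, ∀ u ∈ pvSucc reactions w, u ≠ material ∧ u ∈ V) :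
    ∀ k ∈ V, k ≠ material → ¬ pvReach reactions k material := by
  intro k hk hkm hr
  unfold pvReach at hr
  induction hr using Relation.ReflTransGen.head_induction_on with
  | refl => exact hkm rfl
  | head hstep hrest ih =>
    rename_i a c
    rcases hcl a hk c hstep with ⟨hne, hmem⟩
    exact ih hmem hne

theorem pvBLoop_complete (material : String) (reactions : List (String × Int × (List (Int × String)))) :
    ∀ (f : Nat) (stack : List String) (vis : PySem.Set String),
      pvMu reactions stack vis ≤ f →
      (∀ x ∈ stack, x ∈ vis) →
      (∀ w ∈ vis, w ∈ stack ∨ ∀ u ∈ pvSucc reactions w, u ≠ material ∧ u ∈ vis) →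
      pvBLoop material reactions f stack vis = false →
      ∀ k ∈ vis, k ≠ material → ¬ pvReach reactions k material := by
  intro f
  induction f with
  | zero =>
    intro stack vis hmu _ hinv _
    cases stack with
    | cons v rest => unfold pvMu at hmu; simp at hmu
    | nil =>
      apply pvClosed material reactions vis
      intro w hw
      rcases hinv w hw with hw2 | hw2
      · cases hw2
      · exact hw2
  | succ f ih =>
    intro stack vis hmu hsub hinv hfalse
    cases stack with
    | nil =>
      apply pvClosed material reactions vis
      intro w hw
      rcases hinv w hw with hw2 | hw2
      · cases hw2
      · exact hw2
    | cons v rest =>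
      rw [pvBLoop] at hfalse
      cases hinner : pvBInner material (pvGetR reactions v).2 rest vis with
      | none => rw [hinner] at hfalse; cases hfalse
      | some sv =>
        obtain ⟨st, vi⟩ := sv
        rw [hinner] at hfalse
        rcases pvBInner_some material reactions _ rest vis st vi hinner (mem_pvUraw reactions v) with
          ⟨pushed, h1, _, h3, h4, h5, h6, h7⟩
        have hmu2 : pvMu reactions st vi ≤ f := by
          have hstep : pvMu reactions (v :: rest) vis = pvMu reactions rest vis + 1 := by
            unfold pvMu
            simp only [List.length_cons]
            omega
          omega
        have hsub2 : ∀ x ∈ st, x ∈ vi := by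
          intro x hx
          rw [h1] at hx
          rcases List.mem_append.mp hx with hx | hx
          · exact h5 x hx
          · exact h3 x (hsub x (List.mem_cons_of_mem _ hx))
        have hinv2 : ∀ w ∈ vi, w ∈ st ∨ ∀ u ∈ pvSucc reactions w, u ≠ material ∧ u ∈ vi := by
          intro w hw
          rcases h4 w hw with hw2 | hw2
          · rcases hinv w hw2 with hw3 | hw3
            · rcases List.mem_cons.mp hw3 with rfl | hw4
              · right
                intro u hu
                rcases List.mem_map.mp hu with ⟨p, hp, rfl⟩
                exact h6 p hp
              · exact Or.inl (by rw [h1]; exact List.mem_append.mpr (Or.inr hw4))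
            · exact Or.inr (fun u hu => ⟨(hw3 u hu).1, h3 u (hw3 u hu).2⟩)
          · exact Or.inl (by rw [h1]; exact List.mem_append.mpr (Or.inl hw2))
        intro k hk hkm
        exact ih st vi hmu2 hsub2 hinv2 hfalse k (h3 k hk) hkm

theorem pvBLoop_main (material : String) (reactions : List (String × Int × (List (Int × String)))) (starts : List String)
    (hstarts : ∀ k ∈ starts, k ≠ material) :
    (pvBLoop material reactions (starts.length + (reactions.map (fun p => p.2.2.length)).sum + 1)
        starts.reverse (PySem.Set.ofList starts) = true)
      ↔ ∃ k ∈ starts, pvReach reactions k material := by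
  constructor
  · intro htrue
    exact pvBLoop_sound material reactions starts _ _ _
      (fun x hx => ⟨x, List.mem_reverse.mp hx, Relation.ReflTransGen.refl⟩) htrue
  · rintro ⟨k, hk, hr⟩
    cases hb : pvBLoop material reactions (starts.length + (reactions.map (fun p => p.2.2.length)).sum + 1)
        starts.reverse (PySem.Set.ofList starts) with
    | true => rfl
    | false =>
      exfalso
      have hlen : (pvUraw reactions).length = (reactions.map (fun p => p.2.2.length)).sum := by
        unfold pvUraw
        simp [List.length_flatMap]
      have hmu : pvMu reactions starts.reverse (PySem.Set.ofList starts) ≤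
          starts.length + (reactions.map (fun p => p.2.2.length)).sum + 1 := by
        unfold pvMu
        have hf := List.length_filter_le (fun x => !(PySem.Set.contains (PySem.Set.ofList starts) x)) (pvUraw reactions)
        simp only [List.length_reverse]
        omega
      exact absurd hr (pvBLoop_complete material reactions _ _ _ hmu
        (fun x hx => (PySem.Set.mem_ofList _ _).mpr (List.mem_reverse.mp hx))
        (fun w hw => Or.inl (List.mem_reverse.mpr ((PySem.Set.mem_ofList _ _).mp hw)))
        hb k ((PySem.Set.mem_ofList _ _).mpr hk) (hstarts k hk))

-- ===== VERDICT (by name: the statement is the Claim_ definition above) =====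
theorem used_by_other_spec : Claim_equal_used_by_other := by
  intro material needed reactions _ hpre
  unfold Spec_used_by_other used_by_other used_by_other_alt
  by_cases hOre : material == "ORE"
  · rw [if_pos hOre, if_pos hOre]
  · rw [if_neg hOre, if_neg hOre]
    apply Bool.eq_iff_iff.mpr
    rw [pvAOuter_iff material needed reactions hpre,
      pvBLoop_main material reactions _
        (by intro k hk
            rw [List.mem_filter] at hk
            have hc := hk.2
            intro h
            rw [h] at hc
            simp at hc)]
    constructor
    · rintro ⟨k, hk, ⟨h1, h2⟩, hr⟩
      exact ⟨k, List.mem_filter.mpr ⟨hk, by simp [h1, h2]⟩, hr⟩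
    · rintro ⟨k, hk, hr⟩
      rw [List.mem_filter] at hk
      refine ⟨k, hk.1, ⟨?_, ?_⟩, hr⟩
      · intro h
        have hc := hk.2
        rw [h] at hc
        simp at hc
      · intro h
        have hc := hk.2
        rw [h] at hc
        simp at hc
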